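-- pv_equiv track=rewrite | github.com/calvincchen/605.645 | Mod2/cchen218.py | find_max_board
-- ===== SOURCE A (Python) =====
-- def find_max_board(boards, scores, prev_boards):
-- 	max_score = -float("Inf")
-- 	max_board = []
--
-- 	for i in range(len(scores)):
-- 		if scores[i] > max_score and boards[i] not in prev_boards:
-- 			max_score = scores[i]
-- 			max_board = boards[i]
-- 	return max_board
-- ===== SOURCE B (Python) =====
-- def find_max_board(boards, scores, prev_boards):
--     # Two-phase over the score/board pairs: collect valid pairs, take the max
--     # valid score, return the first board achieving it ([] when none is valid).
--     valid = [(sc, bd) for sc, bd in zip(scores, boards) if bd not in prev_boards]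
--     if not valid:
--         return []
--     best = max(sc for sc, _ in valid)
--     for sc, bd in valid:
--         if sc == best:
--             return bd
-- ===== Notes on version B (the rewrite author's own statement) =====
-- stated objective: simpler
-- what changed: Replaces the single running-max loop with a -inf sentinel by a two-phase decomposition over zip(scores, boards): filter the valid pairs, take the maximum valid score, and return the first board achieving it ([] when none is valid).
import Mathlib
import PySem

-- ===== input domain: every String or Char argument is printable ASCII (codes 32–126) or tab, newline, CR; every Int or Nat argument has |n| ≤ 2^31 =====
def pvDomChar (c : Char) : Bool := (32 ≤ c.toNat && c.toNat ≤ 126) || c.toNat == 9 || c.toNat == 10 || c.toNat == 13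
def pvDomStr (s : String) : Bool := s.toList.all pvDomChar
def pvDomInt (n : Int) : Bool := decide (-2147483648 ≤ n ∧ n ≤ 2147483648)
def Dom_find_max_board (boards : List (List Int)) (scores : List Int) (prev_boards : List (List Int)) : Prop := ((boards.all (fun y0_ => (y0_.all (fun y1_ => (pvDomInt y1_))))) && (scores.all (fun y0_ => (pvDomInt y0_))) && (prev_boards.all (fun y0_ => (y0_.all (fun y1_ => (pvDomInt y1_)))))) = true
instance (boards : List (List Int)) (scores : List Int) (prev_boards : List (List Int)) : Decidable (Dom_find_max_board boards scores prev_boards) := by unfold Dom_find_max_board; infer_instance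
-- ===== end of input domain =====

-- B replaces A's running-max loop (with a -inf sentinel) by a two-phase decomposition
-- over the zipped score/board pairs: valid pairs, then the max valid score, then the first
-- board achieving it (objective: simpler).

-- ===== PORT A =====
-- 'scores[i] > max_score' where max_score starts at -float("Inf"): the running max is
-- Option Int, 'none' being -inf (scores are ints, so every int is > -inf).
def pvGtO (x : Int) (ms : Option Int) : Bool :=
  match ms with
  | none => true
  | some m => decide (m < x)

-- scores[i]/boards[i] are ported with pyGetD: Pre_ guarantees every accessed index is in range.
def find_max_board (boards : List (List Int)) (scores : List Int) (prev_boards : List (List Int)) : List Int :=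
  ((PySem.List.pyRange 0 (scores.length : Int) 1).foldl
    (fun st i =>
      if pvGtO (PySem.List.pyGetD scores i 0) st.1
          && !(decide (PySem.List.pyGetD boards i [] ∈ prev_boards))
      then (some (PySem.List.pyGetD scores i 0), PySem.List.pyGetD boards i [])
      else st)
    ((none : Option Int), ([] : List Int))).2

-- ===== PORT B =====
def find_max_board_alt (boards : List (List Int)) (scores : List Int) (prev_boards : List (List Int)) : List Int :=
  let valid := (scores.zip boards).filter (fun p => !(decide (p.2 ∈ prev_boards)))
  if valid.isEmpty then []
  else
    match PySem.List.max? (valid.map (fun p => p.1)) (fun y => y) with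
    | none => []  -- unreachable: valid is nonempty
    | some best =>
      match valid.find? (fun p => p.1 == best) with
      | some p => p.2
      | none => []  -- unreachable: best is attained

-- ===== PRECONDITION & SPEC =====
-- Pre_ admits exactly the inputs on which Python A returns: it excludes those where the loop
-- reaches an index i >= len(boards) whose score exceeds every valid prefix score, and A
-- raises IndexError (B, which zips scores with boards, returns there).
def Pre_find_max_board (boards : List (List Int)) (scores : List Int) (prev_boards : List (List Int)) : Prop :=
  ∀ i ∈ List.range scores.length, boards.length ≤ i →
    ∃ j ∈ List.range boards.length, boards.getD j [] ∉ prev_boards ∧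
      scores.getD i 0 ≤ scores.getD j 0
instance (boards : List (List Int)) (scores : List Int) (prev_boards : List (List Int)) : Decidable (Pre_find_max_board boards scores prev_boards) := by unfold Pre_find_max_board; infer_instance

def pvWitness_find_max_board : List (List Int) × List Int × List (List Int) :=
  ([[1, 2], [3, 4]], [5, 7], [[3, 4]])

def Spec_find_max_board (boards : List (List Int)) (scores : List Int) (prev_boards : List (List Int)) (out : List Int) : Prop := out = find_max_board_alt boards scores prev_boards
instance (boards : List (List Int)) (scores : List Int) (prev_boards : List (List Int)) (out : List Int) : Decidable (Spec_find_max_board boards scores prev_boards out) := by unfold Spec_find_max_board; infer_instance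

-- ===== CLAIM (what is proved, stated in full; the proofs are below) =====
def Claim_equal_find_max_board : Prop := ∀ (boards : List (List Int)) (scores : List Int) (prev_boards : List (List Int)), Dom_find_max_board boards scores prev_boards → Pre_find_max_board boards scores prev_boards → Spec_find_max_board boards scores prev_boards (find_max_board boards scores prev_boards)
-- ===== LEMMAS AND PROOFS =====

theorem pv_foldA_char (s : Int → Int) (v : Int → Bool) (b : Int → List Int) :
    ∀ (l : List Int) (ms : Option Int) (mb : List Int),
    l.foldl (fun st i => if pvGtO (s i) st.1 && v i then (some (s i), b i) else st) (ms, mb)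
    = match PySem.List.max? ((l.filter v).map s) (fun y => y) with
      | none => (ms, mb)
      | some M =>
        if pvGtO M ms then
          (some M, match (l.filter v).find? (fun i => s i == M) with
                   | some j => b j
                   | none => mb)
        else (ms, mb) := by
  intro l
  induction l with
  | nil => intro ms mb; rfl
  | cons i t ih =>
    intro ms mb
    by_cases hv : v i
    · by_cases hg : pvGtO (s i) ms
      · simp only [List.foldl_cons, hg, hv, Bool.and_self, if_pos, List.filter_cons_of_pos hv,
          List.map_cons]
        rw [ih]
        rcases hft : t.filter v with _ | ⟨j, t'⟩
        · simp [PySem.List.max?, hg]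
        · rw [List.map_cons, PySem.List.max?_id_cons, PySem.List.max?_id_cons,
            List.foldl_cons, List.foldl_assoc]
          by_cases h2 : s i < (List.map s t').foldl max (s j)
          · have hmax : max (s i) ((List.map s t').foldl max (s j))
                = (List.map s t').foldl max (s j) := max_eq_right (le_of_lt h2)
            have hgt : pvGtO ((List.map s t').foldl max (s j)) ms = true := by
              rcases ms with _ | m
              · rfl
              · simp only [pvGtO, decide_eq_true_eq] at hg ⊢
                omega
            have hgt2 : pvGtO ((List.map s t').foldl max (s j)) (some (s i)) = true := by
              simp [pvGtO, h2]
            have hne : (s i == (List.map s t').foldl max (s j)) = false := by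
              simp only [beq_eq_false_iff_ne, ne_eq]
              omega
            have hfind : (List.find? (fun k => s k == (List.map s t').foldl max (s j))
                (j :: t')).isSome := by
              rw [List.find?_isSome]
              rcases PySem.List.foldl_max_mem (List.map s t') (s j) with h | h
              · exact ⟨j, List.mem_cons_self, by simp [h]⟩
              · rcases List.mem_map.mp h with ⟨k, hk, hsk⟩
                exact ⟨k, List.mem_cons_of_mem _ hk, by simp [hsk]⟩
            rcases hf : List.find? (fun k => s k == (List.map s t').foldl max (s j)) (j :: t')
                with _ | k
            · rw [hf] at hfind; simp at hfind
            · simp [hmax, hgt, hgt2, hne, hf]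
          · have hmax : max (s i) ((List.map s t').foldl max (s j)) = s i :=
              max_eq_left (by omega)
            have hgt2 : pvGtO ((List.map s t').foldl max (s j)) (some (s i)) = false := by
              simp [pvGtO, h2]
            simp [hmax, hgt2, hg]
      · have hbody : (pvGtO (s i) ms && v i) = false := by simp [hg]
        simp only [List.foldl_cons, hbody, Bool.false_eq_true, if_neg, not_false_eq_true,
          List.filter_cons_of_pos hv, List.map_cons]
        rw [ih]
        rcases ms with _ | m
        · exact absurd rfl hg
        have hle : s i ≤ m := by
          simp only [pvGtO, decide_eq_true_eq] at hg
          omega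
        rcases hft : t.filter v with _ | ⟨j, t'⟩
        · have hgf : pvGtO (s i) (some m) = false := by simp [pvGtO]; omega
          simp [PySem.List.max?, hgf]
        · rw [List.map_cons, PySem.List.max?_id_cons, PySem.List.max?_id_cons,
            List.foldl_cons, List.foldl_assoc]
          by_cases h2 : m < (List.map s t').foldl max (s j)
          · have hmax : max (s i) ((List.map s t').foldl max (s j))
                = (List.map s t').foldl max (s j) := max_eq_right (by omega)
            have hgt : pvGtO ((List.map s t').foldl max (s j)) (some m) = true := by
              simp [pvGtO, h2]
            have hne : (s i == (List.map s t').foldl max (s j)) = false := by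
              simp only [beq_eq_false_iff_ne, ne_eq]
              omega
            simp [hmax, hgt, List.find?_cons, hne]
          · have hgf : pvGtO (max (s i) ((List.map s t').foldl max (s j))) (some m) = false := by
              simp [pvGtO]; omega
            have hgf2 : pvGtO ((List.map s t').foldl max (s j)) (some m) = false := by
              simp [pvGtO]; omega
            simp [hgf, hgf2]
    · simp only [List.foldl_cons, hv, Bool.and_false, Bool.false_eq_true, if_neg,
        not_false_eq_true, List.filter_cons_of_neg hv]
      exact ih ms mb

-- The zipped pair list is the index list over the common prefix mapped through the lookups.
theorem pv_zip_eq_map (scores : List Int) (boards : List (List Int)) :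
    scores.zip boards = (PySem.List.pyRange 0 ((min scores.length boards.length : Nat) : Int) 1).map
      (fun i => (PySem.List.pyGetD scores i 0, PySem.List.pyGetD boards i [])) := by
  apply List.ext_getElem
  · simp [PySem.List.length_pyRange_one]
    omega
  · intro k h1 h2
    have hks : k < scores.length := by simp at h1; omega
    have hkb : k < boards.length := by simp at h1; omega
    simp [PySem.List.getElem_pyRange_one, PySem.List.pyGetD_eq_getElem, hks, hkb]

-- A step that never fires leaves the state alone.
theorem pv_fold_skip (s : Int → Int) (v : Int → Bool) (b : Int → List Int) :
    ∀ (l : List Int) (st : Option Int × List Int),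
    (∀ i ∈ l, (pvGtO (s i) st.1 && v i) = false) →
    l.foldl (fun st i => if pvGtO (s i) st.1 && v i then (some (s i), b i) else st) st = st := by
  intro l
  induction l with
  | nil => intro st _; rfl
  | cons a t ih =>
    intro st h
    have ha := h a List.mem_cons_self
    simp only [List.foldl_cons, ha, Bool.false_eq_true, if_neg, not_false_eq_true]
    exact ih st (fun i hi => h i (List.mem_cons_of_mem a hi))

-- ===== VERDICT (by name: the statement is the Claim_ definition above) =====
theorem find_max_board_spec : Claim_equal_find_max_board := by
  intro boards scores prev_boards _ hpre
  unfold Pre_find_max_board at hpre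
  unfold Spec_find_max_board find_max_board find_max_board_alt
  rw [PySem.List.pyRange_one_append 0 ((min scores.length boards.length : Nat) : Int)
      (scores.length : Int) (by positivity) (by exact_mod_cast Nat.min_le_left _ _),
    List.foldl_append]
  rw [pv_foldA_char (fun i => PySem.List.pyGetD scores i 0)
      (fun i => !(decide (PySem.List.pyGetD boards i [] ∈ prev_boards)))
      (fun i => PySem.List.pyGetD boards i [])
      (PySem.List.pyRange 0 ((min scores.length boards.length : Nat) : Int) 1) none []]
  have hvalid : (scores.zip boards).filter (fun p => !(decide (p.2 ∈ prev_boards)))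
      = ((PySem.List.pyRange 0 ((min scores.length boards.length : Nat) : Int) 1).filter
          (fun i => !(decide (PySem.List.pyGetD boards i [] ∈ prev_boards)))).map
        (fun i => (PySem.List.pyGetD scores i 0, PySem.List.pyGetD boards i [])) := by
    rw [pv_zip_eq_map scores boards, List.filter_map]
    rfl
  rw [hvalid]
  simp only [List.map_map, List.find?_map, List.isEmpty_map, Function.comp_def]
  rcases hmax : PySem.List.max?
      (((PySem.List.pyRange 0 ((min scores.length boards.length : Nat) : Int) 1).filter
          (fun i => !(decide (PySem.List.pyGetD boards i [] ∈ prev_boards)))).map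
        (fun i => PySem.List.pyGetD scores i 0)) (fun y => y) with _ | M
  · -- no valid board in the common prefix: the filtered list is empty and both sides are []
    have hfe : (PySem.List.pyRange 0 ((min scores.length boards.length : Nat) : Int) 1).filter
        (fun i => !(decide (PySem.List.pyGetD boards i [] ∈ prev_boards))) = [] := by
      have := (PySem.List.max?_eq_none_iff _ _).mp hmax
      exact List.map_eq_nil_iff.mp this
    -- the leftover suffix loop never fires: if it could, Pre_ would demand a valid prefix board
    rw [pv_fold_skip]
    · simp
    · intro i hi
      rw [PySem.List.mem_pyRange_one] at hi
      have him : boards.length ≤ i.toNat ∧ i.toNat < scores.length := by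
        constructor <;> omega
      obtain ⟨j, hjr, hjv, -⟩ := hpre i.toNat (List.mem_range.mpr him.2) him.1
      simp only [List.mem_range] at hjr
      exfalso
      have hj : (j : Int) ∈ (PySem.List.pyRange 0 ((min scores.length boards.length : Nat) : Int) 1).filter
          (fun i => !(decide (PySem.List.pyGetD boards i [] ∈ prev_boards))) := by
        rw [List.mem_filter, PySem.List.mem_pyRange_one]
        refine ⟨⟨by positivity, by exact_mod_cast by omega⟩, ?_⟩
        simpa [PySem.List.pyGetD_natCast] using hjv
      rw [hfe] at hj
      exact absurd hj (List.not_mem_nil)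
  · -- some valid board: the suffix loop never fires because M bounds every out-of-range score
    rw [pv_fold_skip]
    · have hne : ((PySem.List.pyRange 0 ((min scores.length boards.length : Nat) : Int) 1).filter
          (fun i => !(decide (PySem.List.pyGetD boards i [] ∈ prev_boards)))) ≠ [] := by
        intro h
        rw [h] at hmax
        exact absurd hmax (by simp [PySem.List.max?])
      rcases hfl : (PySem.List.pyRange 0 ((min scores.length boards.length : Nat) : Int) 1).filter
          (fun i => !(decide (PySem.List.pyGetD boards i [] ∈ prev_boards))) with _ | ⟨j, rest⟩
      · exact absurd hfl hne
      · rw [hfl] at hmax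
        simp only [List.map_cons, List.isEmpty_cons, PySem.List.max?_id_cons, Option.some.injEq] at hmax ⊢
        rcases hmax with rfl
        rcases (j :: rest).find?
            (fun i => PySem.List.pyGetD scores i 0
              == (rest.map (fun i => PySem.List.pyGetD scores i 0)).foldl max
                   (PySem.List.pyGetD scores j 0)) with _ | k
        · simp [pvGtO]
        · simp [pvGtO]
    · intro i hi
      rw [PySem.List.mem_pyRange_one] at hi
      have him : boards.length ≤ i.toNat ∧ i.toNat < scores.length := by
        constructor <;> omega
      obtain ⟨j, hjr, hjv, hsle⟩ := hpre i.toNat (List.mem_range.mpr him.2) him.1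
      simp only [List.mem_range] at hjr
      have hj : (j : Int) ∈ (PySem.List.pyRange 0 ((min scores.length boards.length : Nat) : Int) 1).filter
          (fun i => !(decide (PySem.List.pyGetD boards i [] ∈ prev_boards))) := by
        rw [List.mem_filter, PySem.List.mem_pyRange_one]
        refine ⟨⟨by positivity, by exact_mod_cast by omega⟩, ?_⟩
        simpa [PySem.List.pyGetD_natCast] using hjv
      have hjM : PySem.List.pyGetD scores (j : Int) 0 ≤ M :=
        PySem.List.max?_isMax hmax _ (List.mem_map.mpr ⟨(j : Int), hj, rfl⟩)
      have hii : (i.toNat : Int) = i := by omega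
      have hsi : PySem.List.pyGetD scores i 0 ≤ M := by
        rw [← hii]
        rw [PySem.List.pyGetD_natCast] at hjM ⊢
        calc scores.getD i.toNat 0 ≤ scores.getD j 0 := hsle
          _ ≤ M := hjM
      have hnot : ¬ (M < PySem.List.pyGetD scores i 0) := by omega
      simp [pvGtO, hnot]
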